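-- pv_equiv track=rewrite | github.com/lucsetzer/prompts-alchemy-suite | app.py | get_topic_guidance
-- ===== SOURCE A (Python) =====
-- def get_topic_guidance(topic: str) -> str:
--     topic_lower = topic.lower()
--     if any(word in topic_lower for word in ["ai", "artificial", "generated", "machine learning"]):
--         return "• Focus on technology, futurism, ethics\n• Highlight uncanny valley, implications\n• Use tech-savvy but accessible language"
--     elif any(word in topic_lower for word in ["review", "product", "service", "app"]):
--         return "• Focus on value, features, pros/cons\n• Highlight pain points and solutions\n• Use authentic, experience-based language"
--     elif any(word in topic_lower for word in ["tutorial", "how to", "guide", "learn"]):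
--         return "• Focus on transformation, results\n• Highlight before/after, ease of learning\n• Use empowering, step-by-step language"
--     elif any(word in topic_lower for word in ["vlog", "personal", "story", "day in life"]):
--         return "• Focus on authenticity, connection\n• Highlight relatable moments, emotions\n• Use conversational, intimate language"
--     else:
--        return "• Tailor hooks specifically to this topic\n• Use topic-relevant language and examples\n• Make hooks feel custom, not generic"
-- ===== SOURCE B (Python) =====
-- _KEYWORD_PRIORITY = {
--     "ai": 0, "artificial": 0, "generated": 0, "machine learning": 0,
--     "review": 1, "product": 1, "service": 1, "app": 1,
--     "tutorial": 2, "how to": 2, "guide": 2, "learn": 2,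
--     "vlog": 3, "personal": 3, "story": 3, "day in life": 3,
-- }
--
-- _GUIDANCES = [
--     "• Focus on technology, futurism, ethics\n• Highlight uncanny valley, implications\n• Use tech-savvy but accessible language",
--     "• Focus on value, features, pros/cons\n• Highlight pain points and solutions\n• Use authentic, experience-based language",
--     "• Focus on transformation, results\n• Highlight before/after, ease of learning\n• Use empowering, step-by-step language",
--     "• Focus on authenticity, connection\n• Highlight relatable moments, emotions\n• Use conversational, intimate language",
--     "• Tailor hooks specifically to this topic\n• Use topic-relevant language and examples\n• Make hooks feel custom, not generic",
-- ]
--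
--
-- def get_topic_guidance(topic: str) -> str:
--     topic_lower = topic.lower()
--     best = 4
--     for keyword, priority in _KEYWORD_PRIORITY.items():
--         if priority < best and keyword in topic_lower:
--             best = priority
--     return _GUIDANCES[best]
-- ===== Notes on version B (the rewrite author's own statement) =====
-- stated objective: alternative
-- what changed: Replaced the group-by-group if/elif first-match dispatch with one exhaustive pass over a flat keyword-to-priority map that keeps the minimum matched priority and indexes a guidance array at the end (no early exit, no group structure in control flow).
import Mathlib
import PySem

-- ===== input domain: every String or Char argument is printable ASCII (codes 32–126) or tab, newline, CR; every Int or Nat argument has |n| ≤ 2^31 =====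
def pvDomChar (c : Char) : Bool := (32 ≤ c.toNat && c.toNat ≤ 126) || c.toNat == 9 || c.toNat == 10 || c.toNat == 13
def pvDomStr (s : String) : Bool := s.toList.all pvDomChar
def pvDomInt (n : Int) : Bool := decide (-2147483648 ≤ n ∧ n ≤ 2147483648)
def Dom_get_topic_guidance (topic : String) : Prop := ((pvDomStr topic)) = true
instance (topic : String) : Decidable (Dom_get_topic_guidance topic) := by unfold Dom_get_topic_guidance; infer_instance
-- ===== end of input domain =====

-- B replaces A's group-wise if/elif first-match chain with one exhaustive pass over a flat keyword→priority map keeping the minimum matched priority; same return values.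


-- ===== PORT A =====
def get_topic_guidance (topic : String) : String :=
  let topic_lower := PySem.Str.lower topic
  if (["ai", "artificial", "generated", "machine learning"]).any (fun word => PySem.Str.isIn word topic_lower) then
    "• Focus on technology, futurism, ethics\n• Highlight uncanny valley, implications\n• Use tech-savvy but accessible language"
  else if (["review", "product", "service", "app"]).any (fun word => PySem.Str.isIn word topic_lower) then
    "• Focus on value, features, pros/cons\n• Highlight pain points and solutions\n• Use authentic, experience-based language"
  else if (["tutorial", "how to", "guide", "learn"]).any (fun word => PySem.Str.isIn word topic_lower) then
    "• Focus on transformation, results\n• Highlight before/after, ease of learning\n• Use empowering, step-by-step language"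
  else if (["vlog", "personal", "story", "day in life"]).any (fun word => PySem.Str.isIn word topic_lower) then
    "• Focus on authenticity, connection\n• Highlight relatable moments, emotions\n• Use conversational, intimate language"
  else
    "• Tailor hooks specifically to this topic\n• Use topic-relevant language and examples\n• Make hooks feel custom, not generic"

-- ===== PORT B =====
-- the flat keyword→priority map of Source B, in insertion order (priorities are small Nats)
def pvKeywordPriority : List (String × Nat) :=
  [("ai", 0), ("artificial", 0), ("generated", 0), ("machine learning", 0),
   ("review", 1), ("product", 1), ("service", 1), ("app", 1),
   ("tutorial", 2), ("how to", 2), ("guide", 2), ("learn", 2),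
   ("vlog", 3), ("personal", 3), ("story", 3), ("day in life", 3)]

def pvGuidances : List String :=
  ["• Focus on technology, futurism, ethics\n• Highlight uncanny valley, implications\n• Use tech-savvy but accessible language",
   "• Focus on value, features, pros/cons\n• Highlight pain points and solutions\n• Use authentic, experience-based language",
   "• Focus on transformation, results\n• Highlight before/after, ease of learning\n• Use empowering, step-by-step language",
   "• Focus on authenticity, connection\n• Highlight relatable moments, emotions\n• Use conversational, intimate language",
   "• Tailor hooks specifically to this topic\n• Use topic-relevant language and examples\n• Make hooks feel custom, not generic"]

-- Source B's loop: fold over the flat map keeping the minimum matched priority (start 4 = default slot);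
-- the final list indexing is in range by construction, ported as getD (the default is unreachable).
def get_topic_guidance_alt (topic : String) : String :=
  let topic_lower := PySem.Str.lower topic
  let best := pvKeywordPriority.foldl
    (fun b e => if e.2 < b ∧ PySem.Str.isIn e.1 topic_lower then e.2 else b) 4
  pvGuidances.getD best ""

-- ===== PRECONDITION & SPEC =====
def Spec_get_topic_guidance (topic : String) (out : String) : Prop := out = get_topic_guidance_alt topic
instance (topic : String) (out : String) : Decidable (Spec_get_topic_guidance topic out) := by unfold Spec_get_topic_guidance; infer_instance

-- ===== CLAIM (what is proved, stated in full; the proofs are below) =====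
def Claim_equal_get_topic_guidance : Prop := ∀ (topic : String), Dom_get_topic_guidance topic → Spec_get_topic_guidance topic (get_topic_guidance topic)

-- ===== LEMMAS AND PROOFS =====

-- folding the min-accumulator over one constant-priority keyword group
theorem pv_fold_group (tl : String) (p : Nat) (kws : List String) (best : Nat) :
    List.foldl (fun b (e : String × Nat) => if e.2 < b ∧ PySem.Str.isIn e.1 tl then e.2 else b)
      best (kws.map (fun k => (k, p)))
    = if p < best ∧ kws.any (fun k => PySem.Str.isIn k tl) then p else best := by
  induction kws generalizing best with
  | nil => simp
  | cons kw kws ih =>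
    rw [List.map_cons, List.foldl_cons, ih, List.any_cons]
    cases hm : PySem.Str.isIn kw tl <;>
      cases ha : kws.any (fun k => PySem.Str.isIn k tl) <;>
        simp only [hm, ha, Bool.false_or, Bool.or_false, Bool.true_or, Bool.or_true] <;>
          split_ifs <;> first | rfl | omega | simp_all | tauto

-- ===== VERDICT (by name: the statement is the Claim_ definition above) =====
theorem get_topic_guidance_spec : Claim_equal_get_topic_guidance := by
  intro topic _
  unfold Spec_get_topic_guidance get_topic_guidance get_topic_guidance_alt
  have hsplit : pvKeywordPriority
      = ((["ai", "artificial", "generated", "machine learning"]).map (fun k => (k, 0)))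
        ++ ((["review", "product", "service", "app"]).map (fun k => (k, (1 : Nat))))
        ++ ((["tutorial", "how to", "guide", "learn"]).map (fun k => (k, (2 : Nat))))
        ++ ((["vlog", "personal", "story", "day in life"]).map (fun k => (k, (3 : Nat)))) := by rfl
  rw [hsplit]
  simp only [List.foldl_append, pv_fold_group]
  cases h1 : (["ai", "artificial", "generated", "machine learning"]).any (fun word => PySem.Str.isIn word (PySem.Str.lower topic)) <;>
    cases h2 : (["review", "product", "service", "app"]).any (fun word => PySem.Str.isIn word (PySem.Str.lower topic)) <;>
      cases h3 : (["tutorial", "how to", "guide", "learn"]).any (fun word => PySem.Str.isIn word (PySem.Str.lower topic)) <;>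
        cases h4 : (["vlog", "personal", "story", "day in life"]).any (fun word => PySem.Str.isIn word (PySem.Str.lower topic)) <;>
          simp [h1, h2, h3, h4, pvGuidances]
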